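-- pv_equiv track=rewrite | github.com/pmoracho/pboletin | pboletin.py | conectar_verticales
-- ===== SOURCE A (Python) =====
-- def conectar_verticales(mylista, level=50):
--
--     newlist = mylista[:]
--     verticales = [linea for linea in mylista if linea[0] == linea[2]]
--     horizontales = [linea for linea in mylista if linea[1] == linea[3]]
--     yvert = {}
--     for i in [linea[1] for linea in horizontales]:
--         for j in range(0, level):
--             yvert[i+j] = i
--             yvert[i-j] = i
--
--     for i, l in enumerate(verticales):
--         verticales[i][1] = yvert.get(verticales[i][1], verticales[i][1])
--         verticales[i][3] = yvert.get(verticales[i][3], verticales[i][3])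
--
--     return newlist
-- ===== SOURCE B (Python) =====
-- def conectar_verticales(mylista, level=50):
--     # Simpler: no index dict; snap each vertical endpoint to the last
--     # horizontal y within distance level-1, mutating lines in place.
--     newlist = mylista[:]
--     hys = [l[1] for l in mylista if l[1] == l[3]]
--     for l in mylista:
--         if l[0] == l[2]:
--             for idx in (1, 3):
--                 y = l[idx]
--                 snapped = None
--                 for hy in hys:
--                     if abs(hy - y) <= level - 1:
--                         snapped = hy
--                 if snapped is not None:
--                     l[idx] = snapped
--     return newlist
-- ===== Notes on version B (the rewrite author's own statement) =====
-- stated objective: simpler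
-- what changed: B removes A's yvert index dict (O(level) insertions per horizontal line) and instead snaps each vertical endpoint by scanning the horizontal y-list for the last y within level-1.
import Mathlib
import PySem

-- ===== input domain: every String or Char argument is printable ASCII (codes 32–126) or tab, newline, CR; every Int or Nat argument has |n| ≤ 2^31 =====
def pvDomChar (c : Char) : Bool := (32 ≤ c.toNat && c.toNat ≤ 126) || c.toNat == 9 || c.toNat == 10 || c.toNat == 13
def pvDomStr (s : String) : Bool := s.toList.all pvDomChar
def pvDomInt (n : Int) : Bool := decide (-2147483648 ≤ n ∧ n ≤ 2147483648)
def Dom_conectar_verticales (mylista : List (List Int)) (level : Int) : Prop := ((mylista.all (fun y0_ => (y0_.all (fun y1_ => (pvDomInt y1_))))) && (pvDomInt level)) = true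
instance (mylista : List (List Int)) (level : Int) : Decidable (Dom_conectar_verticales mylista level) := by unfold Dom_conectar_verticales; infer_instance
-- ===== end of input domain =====

-- B drops A's yvert index dict: each vertical endpoint is snapped by scanning the
-- horizontal y-list for the LAST y within level-1 (objective: simpler). A mutates the
-- shared line lists in place and returns a shallow copy; B performs the same in-place
-- mutation, and the equivalence proved here is about the returned value.


-- ===== PORT A =====
-- yvert built exactly as A does: for each horizontal y i, for j in range(0, level):
-- yvert[i+j] = i; yvert[i-j] = i  (later horizontals overwrite earlier ones)
def yvertA (horys : List Int) (level : Int) : PySem.Dict Int Int :=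
  horys.foldl
    (fun d i =>
      (PySem.List.pyRange 0 level 1).foldl
        (fun d j => (d.insert (i + j) i).insert (i - j) i) d)
    PySem.Dict.empty

-- one mutation statement 'verticales[i][idx] = yvert.get(verticales[i][idx], verticales[i][idx])'
def snapIdxA (yvert : PySem.Dict Int Int) (l : List Int) (idx : Nat) : List Int :=
  l.set idx (yvert.getD (PySem.List.pyGetD l (idx : Int) 0) (PySem.List.pyGetD l (idx : Int) 0))

-- The in-place mutation of the vertical lines (shared between mylista and the shallow
-- copy newlist) is modelled on the returned value: each vertical line has indices 1
-- then 3 replaced; non-vertical lines are untouched.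
def conectar_verticales (mylista : List (List Int)) (level : Int) : List (List Int) :=
  let horizontales := mylista.filter (fun l => PySem.List.pyGetD l 1 0 == PySem.List.pyGetD l 3 0)
  let yvert := yvertA (horizontales.map (fun l => PySem.List.pyGetD l 1 0)) level
  mylista.map (fun l =>
    if PySem.List.pyGetD l 0 0 == PySem.List.pyGetD l 2 0 then
      snapIdxA yvert (snapIdxA yvert l 1) 3
    else l)

-- ===== PORT B =====
-- last horizontal y with |hy - y| <= level - 1, scanning hys left to right
def snapB (hys : List Int) (level y : Int) : Option Int :=
  hys.foldl (fun acc hy => if |hy - y| ≤ level - 1 then some hy else acc) none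

-- B's inner 'for idx in (1, 3)' body: overwrite l[idx] only if a horizontal matched
def snapIdxB (hys : List Int) (level : Int) (l : List Int) (idx : Nat) : List Int :=
  match snapB hys level (PySem.List.pyGetD l (idx : Int) 0) with
  | some h => l.set idx h
  | none => l

def conectar_verticales_alt (mylista : List (List Int)) (level : Int) : List (List Int) :=
  let hys := mylista.filterMap (fun l =>
    if PySem.List.pyGetD l 1 0 == PySem.List.pyGetD l 3 0 then some (PySem.List.pyGetD l 1 0) else none)
  mylista.map (fun l =>
    if PySem.List.pyGetD l 0 0 == PySem.List.pyGetD l 2 0 then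
      [1, 3].foldl (snapIdxB hys level) l
    else l)

-- ===== PRECONDITION & SPEC =====
-- Pre_ excludes exactly the inputs on which A raises: any line shorter than 4
-- elements makes A's horizontales comprehension raise IndexError (linea[3]).
def Pre_conectar_verticales (mylista : List (List Int)) (level : Int) : Prop :=
  ∀ l ∈ mylista, 4 ≤ l.length
instance (mylista : List (List Int)) (level : Int) : Decidable (Pre_conectar_verticales mylista level) := by unfold Pre_conectar_verticales; infer_instance

def pvWitness_conectar_verticales : List (List Int) × Int := ([[0, 0, 0, 9], [1, 2, 7, 2]], 3)

def Spec_conectar_verticales (mylista : List (List Int)) (level : Int) (out : List (List Int)) : Prop := out = conectar_verticales_alt mylista level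
instance (mylista : List (List Int)) (level : Int) (out : List (List Int)) : Decidable (Spec_conectar_verticales mylista level out) := by unfold Spec_conectar_verticales; infer_instance

-- ===== CLAIM (what is proved, stated in full; the proofs are below) =====
def Claim_equal_conectar_verticales : Prop := ∀ (mylista : List (List Int)) (level : Int), Dom_conectar_verticales mylista level → Pre_conectar_verticales mylista level → Spec_conectar_verticales mylista level (conectar_verticales mylista level)

-- ===== LEMMAS AND PROOFS =====

-- the inner j-loop of A covers exactly the keys within n-1 of i
lemma innerNat (n : Nat) (d : PySem.Dict Int Int) (i y dflt : Int) :
    ((List.range n).foldl (fun d (j : Nat) => (d.insert (i + (j : Int)) i).insert (i - (j : Int)) i) d).getD y dflt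
      = if |i - y| ≤ (n : Int) - 1 then i else d.getD y dflt := by
  induction n generalizing d with
  | zero =>
    simp only [List.range_zero, List.foldl_nil]
    rw [if_neg]
    intro h
    have := abs_nonneg (i - y)
    omega
  | succ n ih =>
    rw [List.range_succ, List.foldl_append, List.foldl_cons, List.foldl_nil,
        PySem.Dict.getD_insert, PySem.Dict.getD_insert, ih]
    simp only [abs_le]
    push_cast
    split_ifs <;> first | rfl | (exfalso; omega)

lemma innerInt (d : PySem.Dict Int Int) (level i y dflt : Int) :
    ((PySem.List.pyRange 0 level 1).foldl (fun d j => (d.insert (i + j) i).insert (i - j) i) d).getD y dflt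
      = if |i - y| ≤ level - 1 then i else d.getD y dflt := by
  rw [PySem.List.pyRange_one, List.foldl_map]
  simp only [zero_add, Int.sub_zero]
  rw [innerNat]
  by_cases h : 0 ≤ level
  · rw [Int.toNat_of_nonneg h]
  · rw [if_neg, if_neg]
    · rw [abs_le]; omega
    · rw [abs_le]
      have : level.toNat = 0 := by omega
      omega

-- dict lookup with default y equals B's last-match scan
lemma yvert_eq_snap (hs : List Int) (level y : Int) (d : PySem.Dict Int Int) (acc : Option Int)
    (hinv : d.getD y y = acc.getD y) :
    (hs.foldl (fun d i => (PySem.List.pyRange 0 level 1).foldl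
        (fun d j => (d.insert (i + j) i).insert (i - j) i) d) d).getD y y
      = (hs.foldl (fun acc hy => if |hy - y| ≤ level - 1 then some hy else acc) acc).getD y := by
  induction hs generalizing d acc with
  | nil => simpa using hinv
  | cons h t ih =>
    simp only [List.foldl_cons]
    apply ih
    rw [innerInt]
    split_ifs <;> simp [hinv]

lemma main_lookup (hs : List Int) (level y : Int) :
    (yvertA hs level).getD y y = (snapB hs level y).getD y := by
  unfold yvertA snapB
  exact yvert_eq_snap hs level y PySem.Dict.empty none (by simp [PySem.Dict.getD_empty])

lemma set_self (l : List Int) (i : Nat) (h : i < l.length) : l.set i l[i] = l := by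
  apply List.ext_getElem
  · simp
  · intro k hk hk'
    rw [List.getElem_set]
    split_ifs with he
    · subst he; rfl
    · rfl

lemma pyGetD_nat (l : List Int) (i : Nat) (h : i < l.length) :
    PySem.List.pyGetD l (i : Int) 0 = l[i] := by
  rw [PySem.List.pyGetD_eq_getElem l 0 (by omega) (by exact_mod_cast h)]
  simp

lemma hys_eq (mylista : List (List Int)) :
    mylista.filterMap (fun l =>
        if PySem.List.pyGetD l 1 0 == PySem.List.pyGetD l 3 0 then some (PySem.List.pyGetD l 1 0) else none)
      = (mylista.filter (fun l => PySem.List.pyGetD l 1 0 == PySem.List.pyGetD l 3 0)).map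
          (fun l => PySem.List.pyGetD l 1 0) := by
  induction mylista with
  | nil => rfl
  | cons h t ih =>
    by_cases hc : (PySem.List.pyGetD h 1 0 == PySem.List.pyGetD h 3 0) = true
    · rw [List.filterMap_cons_some (by rw [if_pos hc]), List.filter_cons, if_pos hc,
          List.map_cons, ih]
    · rw [List.filterMap_cons_none (by rw [if_neg hc]), List.filter_cons, if_neg hc, ih]

lemma length_snapIdxB (hys : List Int) (level : Int) (l : List Int) (idx : Nat) :
    (snapIdxB hys level l idx).length = l.length := by
  unfold snapIdxB
  cases snapB hys level (PySem.List.pyGetD l (idx : Int) 0) <;> simp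

lemma snapIdx_eq (hys : List Int) (level : Int) (l : List Int) (idx : Nat) (h : idx < l.length) :
    snapIdxA (yvertA hys level) l idx = snapIdxB hys level l idx := by
  unfold snapIdxA snapIdxB
  rw [main_lookup]
  cases hs : snapB hys level (PySem.List.pyGetD l (idx : Int) 0) with
  | none =>
    simp only [Option.getD_none]
    rw [pyGetD_nat l idx h, set_self l idx h]
  | some hv => simp

-- ===== VERDICT (by name: the statement is the Claim_ definition above) =====
theorem conectar_verticales_spec : Claim_equal_conectar_verticales := by
  intro mylista level _hdom hpre
  unfold Spec_conectar_verticales conectar_verticales conectar_verticales_alt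
  rw [hys_eq]
  apply List.map_congr_left
  intro l hl
  have hlen : 4 ≤ l.length := hpre l hl
  split_ifs with hv
  · simp only [List.foldl_cons, List.foldl_nil]
    rw [snapIdx_eq _ _ l 1 (by omega),
        snapIdx_eq _ _ _ 3 (by rw [length_snapIdxB]; omega)]
  · rfl
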